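-- pv_equiv track=rewrite | github.com/NLP-laboratories/EMR-github-projects | NestedNER/GlobalPointer_GAT/datasets/CHD/1.py | count_nested_entities_with_totals
-- ===== SOURCE A (Python) =====
-- from collections import defaultdict
--
-- def count_nested_entities_with_totals(json_data):
--     # 初始化嵌套实体统计字典
--     nested_entity_count = defaultdict(lambda: defaultdict(int))
--     total_nested_count = defaultdict(int)
--
--     for entry in json_data:
--         labels = entry.get('label', {})
--         entity_positions = []
--
--         # 收集所有实体的位置信息
--         for entity_type, entities in labels.items():
--             for entity, positions in entities.items():
--                 for pos in positions:
--                     entity_positions.append((entity_type, pos, entity))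
--
--         # 对实体位置进行排序，以便处理嵌套关系
--         entity_positions.sort(key=lambda x: (x[1][0], -x[1][1]))
--
--         # 统计嵌套关系
--         for i in range(len(entity_positions)):
--             outer_type, outer_pos, outer_entity = entity_positions[i]
--
--             for j in range(i + 1, len(entity_positions)):
--                 inner_type, inner_pos, inner_entity = entity_positions[j]
--
--                 # 检查是否嵌套
--                 if (outer_pos[0] <= inner_pos[0] and outer_pos[1] >= inner_pos[1]):
--                     nested_entity_count[outer_type][inner_type] += 1
--                     total_nested_count[inner_type] += 1
--
--     return nested_entity_count, total_nested_count
-- ===== SOURCE B (Python) =====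
-- def count_nested_entities_with_totals(json_data):
--     nested, totals = {}, {}
--     for entry in json_data:
--         # group occurrences by their (start, end) span; order of types per span
--         # and of spans is the original flatten order
--         groups = {}
--         for t, ents in entry.get('label', {}).items():
--             for ps in ents.values():
--                 for pos in ps:
--                     groups.setdefault((pos[0], pos[1]), []).append(t)
--         order = sorted(groups, key=lambda p: (p[0], -p[1]))
--         for g, (s, e) in enumerate(order):
--             ts = groups[(s, e)]
--             # one multiplicity table of inner types over the qualifying later spans
--             cross = {}
--             for k2 in order[g + 1:]:
--                 if k2[1] <= e:
--                     for u in groups[k2]: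
--                         cross[u] = cross.get(u, 0) + 1
--             for a, t in enumerate(ts):
--                 for u in ts[a + 1:]:
--                     row = nested.setdefault(t, {})
--                     row[u] = row.get(u, 0) + 1
--                     totals[u] = totals.get(u, 0) + 1
--                 for u, c in cross.items():
--                     row = nested.setdefault(t, {})
--                     row[u] = row.get(u, 0) + c
--                     totals[u] = totals.get(u, 0) + c
--     return nested, totals
-- ===== Notes on version B (the rewrite author's own statement) =====
-- stated objective: alternative
-- what changed: B groups occurrences by their (start,end) span in a dict, sorts only the distinct spans, and for each outer span builds one multiplicity table of inner types over the qualifying later spans, merging per (type,count) product instead of A's per-occurrence-pair increments over the fully flattened sorted list.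
import Mathlib
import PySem

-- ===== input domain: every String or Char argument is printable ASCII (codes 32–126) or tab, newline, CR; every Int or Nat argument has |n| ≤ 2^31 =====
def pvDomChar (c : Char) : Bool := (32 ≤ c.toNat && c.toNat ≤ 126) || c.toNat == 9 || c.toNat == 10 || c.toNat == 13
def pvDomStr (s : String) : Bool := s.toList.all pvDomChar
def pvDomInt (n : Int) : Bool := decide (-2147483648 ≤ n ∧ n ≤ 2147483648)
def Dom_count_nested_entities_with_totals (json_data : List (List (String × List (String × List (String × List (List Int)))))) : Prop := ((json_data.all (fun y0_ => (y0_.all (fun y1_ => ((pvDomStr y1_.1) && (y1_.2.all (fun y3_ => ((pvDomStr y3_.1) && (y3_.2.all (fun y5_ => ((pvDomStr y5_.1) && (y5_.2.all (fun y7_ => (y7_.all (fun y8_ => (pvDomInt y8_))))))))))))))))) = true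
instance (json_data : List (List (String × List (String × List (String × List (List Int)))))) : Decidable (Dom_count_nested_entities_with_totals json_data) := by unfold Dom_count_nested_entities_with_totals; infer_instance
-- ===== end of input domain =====

-- B groups the spans by (start, end) once, sorts only the distinct spans, and counts
-- cross-span nestings by one multiplicity table per outer span instead of A's
-- per-pair increments over all flattened occurrences (alternative algorithm; the
-- return value is proved equal, no observable side effects are involved).

-- ===== PORT A =====
def count_nested_entities_with_totals (json_data : List (List (String × List (String × List (String × List (List Int)))))) : (List (String × List (String × Int))) × (List (String × Int)) :=
  let res := json_data.foldl (fun (acc : PySem.Dict String (PySem.Dict String Int) × PySem.Dict String Int) entry =>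
    let labels := (PySem.Dict.mk entry).getD "label" []
    let entity_positions := labels.foldl (fun eps tp =>
      tp.2.foldl (fun eps ent =>
        ent.2.foldl (fun eps pos => eps ++ [(tp.1, pos, ent.1)]) eps) eps)
      ([] : List (String × List Int × String))
    let eps := PySem.List.sorted2 entity_positions
      (fun x => PySem.List.pyGetD x.2.1 0 0) (fun x => -(PySem.List.pyGetD x.2.1 1 0))
    (PySem.List.pyRange 0 (PySem.List.len eps)).foldl (fun acc i =>
      let outer := PySem.List.pyGetD eps i ("", ([], ""))
      (PySem.List.pyRange (i + 1) (PySem.List.len eps)).foldl (fun acc j =>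
        let inner := PySem.List.pyGetD eps j ("", ([], ""))
        if PySem.List.pyGetD outer.2.1 0 0 ≤ PySem.List.pyGetD inner.2.1 0 0 ∧
           PySem.List.pyGetD outer.2.1 1 0 ≥ PySem.List.pyGetD inner.2.1 1 0 then
          (acc.1.modify outer.1 PySem.Dict.empty (fun dd => dd.modify inner.1 0 (· + 1)),
           acc.2.modify inner.1 0 (· + 1))
        else acc) acc) acc)
    (PySem.Dict.empty, PySem.Dict.empty)
  (res.1.items.map (fun p => (p.1, p.2.items)), res.2.items)

-- ===== PORT B =====
-- 'groups.setdefault(k, []).append(t)' and 'row = nested.setdefault(t, {}); row[u] = row.get(u,0)+c'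
-- mutate the dict value in place: ported as Dict.modify (exact: overwrite keeps position, new key appends).
def count_nested_entities_with_totals_alt (json_data : List (List (String × List (String × List (String × List (List Int)))))) : (List (String × List (String × Int))) × (List (String × Int)) :=
  let res := json_data.foldl (fun (acc : PySem.Dict String (PySem.Dict String Int) × PySem.Dict String Int) entry =>
    let groups := ((PySem.Dict.mk entry).getD "label" []).foldl (fun (groups : PySem.Dict (Int × Int) (List String)) tp =>
      tp.2.foldl (fun groups ent =>
        ent.2.foldl (fun groups pos =>
          groups.modify (PySem.List.pyGetD pos 0 0, PySem.List.pyGetD pos 1 0) [] (· ++ [tp.1])) groups) groups)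
      PySem.Dict.empty
    let order := PySem.List.sorted2 groups.keys (fun p => p.1) (fun p => -p.2)
    (PySem.List.enumerate order).foldl (fun acc gk =>
      let ts := groups.getD gk.2 []
      let cross := (PySem.List.slice order (some (gk.1 + 1))).foldl (fun (cross : PySem.Dict String Int) k2 =>
        if k2.2 ≤ gk.2.2 then
          (groups.getD k2 []).foldl (fun cross u => cross.insert u (cross.getD u 0 + 1)) cross
        else cross) PySem.Dict.empty
      (PySem.List.enumerate ts).foldl (fun acc at_ =>
        let acc := (PySem.List.slice ts (some (at_.1 + 1))).foldl (fun acc u =>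
          (acc.1.modify at_.2 PySem.Dict.empty (fun row => row.insert u (row.getD u 0 + 1)),
           acc.2.insert u (acc.2.getD u 0 + 1))) acc
        cross.items.foldl (fun acc uc =>
          (acc.1.modify at_.2 PySem.Dict.empty (fun row => row.insert uc.1 (row.getD uc.1 0 + uc.2)),
           acc.2.insert uc.1 (acc.2.getD uc.1 0 + uc.2))) acc) acc) acc)
    (PySem.Dict.empty, PySem.Dict.empty)
  (res.1.items.map (fun p => (p.1, p.2.items)), res.2.items)

-- ===== PRECONDITION & SPEC =====
-- Pre_ excludes exactly the inputs on which Python A raises IndexError: a position list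
-- with fewer than two elements under some entry's 'label' value (the sort key reads
-- pos[0] and pos[1]); Python B raises there too.
def Pre_count_nested_entities_with_totals (json_data : List (List (String × List (String × List (String × List (List Int)))))) : Prop :=
  ∀ entry ∈ json_data, ∀ tp ∈ (PySem.Dict.mk entry).getD "label" [], ∀ ent ∈ tp.2, ∀ pos ∈ ent.2, 2 ≤ pos.length
instance (json_data : List (List (String × List (String × List (String × List (List Int)))))) : Decidable (Pre_count_nested_entities_with_totals json_data) := by unfold Pre_count_nested_entities_with_totals; infer_instance
def pvWitness_count_nested_entities_with_totals : (List (List (String × List (String × List (String × List (List Int)))))) :=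
  [[("label", [("PER", [("ab", [[0, 3], [1, 2]])]), ("LOC", [("b", [[1, 1]])])])]]
def Spec_count_nested_entities_with_totals (json_data : List (List (String × List (String × List (String × List (List Int)))))) (out : (List (String × List (String × Int))) × (List (String × Int))) : Prop := out = count_nested_entities_with_totals_alt json_data
instance (json_data : List (List (String × List (String × List (String × List (List Int)))))) (out : (List (String × List (String × Int))) × (List (String × Int))) : Decidable (Spec_count_nested_entities_with_totals json_data out) := by unfold Spec_count_nested_entities_with_totals; infer_instance

-- ===== CLAIM (what is proved, stated in full; the proofs are below) =====
def Claim_equal_count_nested_entities_with_totals : Prop := ∀ (json_data : List (List (String × List (String × List (String × List (List Int)))))), Dom_count_nested_entities_with_totals json_data → Pre_count_nested_entities_with_totals json_data → Spec_count_nested_entities_with_totals json_data (count_nested_entities_with_totals json_data)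

-- ===== LEMMAS AND PROOFS =====

-- Shorthand for the accumulator: the nested-count dict and the totals dict.
abbrev pvNEs := PySem.Dict String (PySem.Dict String Int)
abbrev pvTot := PySem.Dict String Int

-- The projection B applies at collection time (A keeps the raw position list).
def pvG (y : String × List Int × String) : Int × Int × String :=
  (PySem.List.pyGetD y.2.1 0 0, PySem.List.pyGetD y.2.1 1 0, y.1)

-- The span key of a projected occurrence.
def pvK (z : Int × Int × String) : Int × Int := (z.1, z.2.1)

-- Structural form of A's index-based double loop over the sorted list.
def pvRecA : List (String × List Int × String) → pvNEs × pvTot → pvNEs × pvTot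
  | [], acc => acc
  | x :: rest, acc =>
      pvRecA rest (rest.foldl (fun acc y =>
        if PySem.List.pyGetD x.2.1 0 0 ≤ PySem.List.pyGetD y.2.1 0 0 ∧
           PySem.List.pyGetD x.2.1 1 0 ≥ PySem.List.pyGetD y.2.1 1 0 then
          (acc.1.modify x.1 PySem.Dict.empty (fun dd => dd.modify y.1 0 (· + 1)),
           acc.2.modify y.1 0 (· + 1))
        else acc) acc)

-- The same double loop on the projected occurrences.
def pvRecC : List (Int × Int × String) → pvNEs × pvTot → pvNEs × pvTot
  | [], acc => acc
  | x :: rest, acc =>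
      pvRecC rest (rest.foldl (fun acc y =>
        if x.1 ≤ y.1 ∧ x.2.1 ≥ y.2.1 then
          (acc.1.modify x.2.2 PySem.Dict.empty (fun dd => dd.modify y.2.2 0 (· + 1)),
           acc.2.modify y.2.2 0 (· + 1))
        else acc) acc)

-- B's per-occurrence structural recursion within one span group.
def pvOcc (cross : PySem.Dict String Int) : List String → pvNEs × pvTot → pvNEs × pvTot
  | [], acc => acc
  | t :: ts', acc =>
      pvOcc cross ts' (cross.items.foldl (fun acc uc =>
          (acc.1.modify t PySem.Dict.empty (fun row => row.insert uc.1 (row.getD uc.1 0 + uc.2)),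
           acc.2.insert uc.1 (acc.2.getD uc.1 0 + uc.2)))
        (ts'.foldl (fun acc u =>
          (acc.1.modify t PySem.Dict.empty (fun row => row.insert u (row.getD u 0 + 1)),
           acc.2.insert u (acc.2.getD u 0 + 1))) acc))

-- B's structural recursion over the sorted distinct span keys.
def pvRecK (groups : PySem.Dict (Int × Int) (List String)) : List (Int × Int) → pvNEs × pvTot → pvNEs × pvTot
  | [], acc => acc
  | k :: rest, acc =>
      pvRecK groups rest (pvOcc
        (rest.foldl (fun (cross : PySem.Dict String Int) k2 =>
          if k2.2 ≤ k.2 then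
            (groups.getD k2 []).foldl (fun cross u => cross.insert u (cross.getD u 0 + 1)) cross
          else cross) PySem.Dict.empty)
        (groups.getD k []) acc)

-- Accumulator invariant: every key list in play is duplicate-free.
def pvInv (acc : pvNEs × pvTot) : Prop :=
  acc.1.keys.Nodup ∧ (∀ k, (acc.1.getD k PySem.Dict.empty).keys.Nodup) ∧ acc.2.keys.Nodup

-- A's pair phase on an already-sorted list, as it occurs in the port.
def pvLoopA (eps : List (String × List Int × String)) (acc : pvNEs × pvTot) : pvNEs × pvTot :=
  (PySem.List.pyRange 0 (PySem.List.len eps)).foldl (fun acc i =>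
    let outer := PySem.List.pyGetD eps i ("", ([], ""))
    (PySem.List.pyRange (i + 1) (PySem.List.len eps)).foldl (fun acc j =>
      let inner := PySem.List.pyGetD eps j ("", ([], ""))
      if PySem.List.pyGetD outer.2.1 0 0 ≤ PySem.List.pyGetD inner.2.1 0 0 ∧
         PySem.List.pyGetD outer.2.1 1 0 ≥ PySem.List.pyGetD inner.2.1 1 0 then
        (acc.1.modify outer.1 PySem.Dict.empty (fun dd => dd.modify inner.1 0 (· + 1)),
         acc.2.modify inner.1 0 (· + 1))
      else acc) acc) acc

-- B's pair phase: the enumerate/slice loops over the sorted key list, as in the port.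
def pvLoopB (groups : PySem.Dict (Int × Int) (List String)) (order : List (Int × Int)) (acc : pvNEs × pvTot) : pvNEs × pvTot :=
  (PySem.List.enumerate order).foldl (fun acc gk =>
    let ts := groups.getD gk.2 []
    let cross := (PySem.List.slice order (some (gk.1 + 1))).foldl (fun (cross : PySem.Dict String Int) k2 =>
      if k2.2 ≤ gk.2.2 then
        (groups.getD k2 []).foldl (fun cross u => cross.insert u (cross.getD u 0 + 1)) cross
      else cross) PySem.Dict.empty
    (PySem.List.enumerate ts).foldl (fun acc at_ =>
      let acc := (PySem.List.slice ts (some (at_.1 + 1))).foldl (fun acc u =>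
        (acc.1.modify at_.2 PySem.Dict.empty (fun row => row.insert u (row.getD u 0 + 1)),
         acc.2.insert u (acc.2.getD u 0 + 1))) acc
      cross.items.foldl (fun acc uc =>
        (acc.1.modify at_.2 PySem.Dict.empty (fun row => row.insert uc.1 (row.getD uc.1 0 + uc.2)),
         acc.2.insert uc.1 (acc.2.getD uc.1 0 + uc.2))) acc) acc) acc

-- The per-entry step of each port's fold.
def pvBodyA (acc : pvNEs × pvTot) (entry : List (String × List (String × List (String × List (List Int))))) : pvNEs × pvTot :=
  pvLoopA (PySem.List.sorted2
    (((PySem.Dict.mk entry).getD "label" []).foldl (fun eps tp =>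
      tp.2.foldl (fun eps ent =>
        ent.2.foldl (fun eps pos => eps ++ [(tp.1, pos, ent.1)]) eps) eps)
      ([] : List (String × List Int × String)))
    (fun x => PySem.List.pyGetD x.2.1 0 0) (fun x => -(PySem.List.pyGetD x.2.1 1 0))) acc

def pvGroups (entry : List (String × List (String × List (String × List (List Int))))) : PySem.Dict (Int × Int) (List String) :=
  ((PySem.Dict.mk entry).getD "label" []).foldl (fun (groups : PySem.Dict (Int × Int) (List String)) tp =>
    tp.2.foldl (fun groups ent =>
      ent.2.foldl (fun groups pos =>
        groups.modify (PySem.List.pyGetD pos 0 0, PySem.List.pyGetD pos 1 0) [] (· ++ [tp.1])) groups) groups)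
    PySem.Dict.empty

def pvBodyB (acc : pvNEs × pvTot) (entry : List (String × List (String × List (String × List (List Int))))) : pvNEs × pvTot :=
  pvLoopB (pvGroups entry) (PySem.List.sorted2 (pvGroups entry).keys (fun p => p.1) (fun p => -p.2)) acc

-- The flattened projected occurrence stream of one entry.
def pvM (entry : List (String × List (String × List (String × List (List Int))))) : List (Int × Int × String) :=
  ((PySem.Dict.mk entry).getD "label" []).flatMap (fun tp =>
    (tp.2.map (fun p => p.2)).flatMap (fun ps =>
      ps.map (fun pos => (PySem.List.pyGetD pos 0 0, PySem.List.pyGetD pos 1 0, tp.1))))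

-- ---- collection phase ----
theorem pv_collect_eq (labels : List (String × List (String × List (List Int)))) :
    labels.flatMap (fun tp =>
      (tp.2.map (fun p => p.2)).flatMap (fun ps =>
        ps.map (fun pos => (PySem.List.pyGetD pos 0 0, PySem.List.pyGetD pos 1 0, tp.1)))) =
    (labels.foldl (fun eps tp =>
      tp.2.foldl (fun eps ent =>
        ent.2.foldl (fun eps pos => eps ++ [(tp.1, pos, ent.1)]) eps) eps)
      ([] : List (String × List Int × String))).map pvG := by
  have h1 : ∀ (tp : String × List (String × List (List Int))) (eps : List (String × List Int × String)),
      tp.2.foldl (fun eps ent => ent.2.foldl (fun eps pos => eps ++ [(tp.1, pos, ent.1)]) eps) eps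
        = eps ++ tp.2.flatMap (fun ent => ent.2.map (fun pos => (tp.1, pos, ent.1))) := by
    intro tp eps
    rw [← PySem.List.foldl_append_eq_flatMap]
    exact PySem.List.foldl_congr_mem _ _ _ _ (fun acc ent _ => PySem.List.foldl_append_singleton_eq_map _ _ _)
  have h2 := (PySem.List.foldl_congr_mem labels _
      (fun eps tp => eps ++ tp.2.flatMap (fun ent => ent.2.map (fun pos => (tp.1, pos, ent.1))))
      ([] : List (String × List Int × String)) (fun acc tp _ => h1 tp acc)).trans
    (PySem.List.foldl_append_eq_flatMap _ _ _)
  rw [h2]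
  simp only [List.nil_append, List.map_flatMap, List.flatMap_map]
  congr 1
  funext tp
  congr 1
  funext ent
  simp [pvG, Function.comp, List.map_map]

-- ---- sorting phase ----
theorem pv_insertBy_map {α β : Type} (g : α → β) (b : β → β → Bool) (x : α) (l : List α) :
    PySem.List.insertBy b (g x) (l.map g)
      = (PySem.List.insertBy (fun p q => b (g p) (g q)) x l).map g := by
  induction l with
  | nil => simp [PySem.List.insertBy]
  | cons y ys ih =>
      simp only [List.map_cons, PySem.List.insertBy]
      by_cases h : b (g x) (g y)
      · simp [h]
      · simp [h, ih]

theorem pv_foldl_insertBy_map {α β : Type} (g : α → β) (b : β → β → Bool) (xs : List α) :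
    ∀ (acc : List α),
    (xs.map g).foldl (fun acc x => PySem.List.insertBy b x acc) (acc.map g)
      = (xs.foldl (fun acc x => PySem.List.insertBy (fun p q => b (g p) (g q)) x acc) acc).map g := by
  induction xs with
  | nil => intro acc; simp
  | cons x xs ih =>
      intro acc
      simp only [List.map_cons, List.foldl_cons]
      rw [pv_insertBy_map g b x acc, ih]

theorem pv_sorted2_map (xs : List (String × List Int × String)) :
    PySem.List.sorted2 (xs.map pvG) (fun x => x.1) (fun x => -x.2.1) =
      (PySem.List.sorted2 xs (fun x => PySem.List.pyGetD x.2.1 0 0)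
        (fun x => -(PySem.List.pyGetD x.2.1 1 0))).map pvG := by
  show (xs.map pvG).foldl (fun acc x => PySem.List.insertBy _ x acc) ([].map pvG) = _
  rw [pv_foldl_insertBy_map]
  rfl


-- B's triple-nested groups-building loop is the single fold of the flat stream.
theorem pv_groups_eq (entry : List (String × List (String × List (String × List (List Int))))) :
    pvGroups entry = (pvM entry).foldl (fun g z => g.modify (pvK z) [] (· ++ [z.2.2])) PySem.Dict.empty := by
  unfold pvGroups pvM
  rw [List.foldl_flatMap]
  apply PySem.List.foldl_congr_mem
  intro g tp _
  rw [List.foldl_flatMap, List.foldl_map]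
  apply PySem.List.foldl_congr_mem
  intro g ent _
  rw [List.foldl_map]
  rfl

-- A's double loop only reads the projected occurrences.
theorem pv_recA_recC (sps : List (String × List Int × String)) :
    ∀ acc, pvRecA sps acc = pvRecC (sps.map pvG) acc := by
  induction sps with
  | nil => intro acc; rfl
  | cons x rest ih =>
      intro acc
      simp only [pvRecA, pvRecC, List.map_cons, List.foldl_map]
      rw [ih]
      rfl

-- ---- key order ----
def pvLt (p q : Int × Int) : Prop := p.1 < q.1 ∨ (p.1 = q.1 ∧ q.2 < p.2)
def pvLe (p q : Int × Int) : Prop := pvLt p q ∨ p = q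
def pvCmpK (p q : Int × Int) : Bool := decide (p.1 < q.1) || (!decide (q.1 < p.1) && decide (-p.2 < -q.2))
def pvCmpM (x y : Int × Int × String) : Bool := decide (x.1 < y.1) || (!decide (y.1 < x.1) && decide (-x.2.1 < -y.2.1))

theorem pv_cmpM_eq (x y : Int × Int × String) : pvCmpM x y = pvCmpK (pvK x) (pvK y) := rfl

theorem pv_cmpK_true_iff (p q : Int × Int) : pvCmpK p q = true ↔ pvLt p q := by
  simp only [pvCmpK, pvLt, Bool.or_eq_true, Bool.and_eq_true, Bool.not_eq_true', decide_eq_true_eq,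
    decide_eq_false_iff_not]
  omega

theorem pv_cmpK_false_iff (p q : Int × Int) : pvCmpK p q = false ↔ ¬ pvLt p q := by
  rw [← pv_cmpK_true_iff, Bool.not_eq_true]

theorem pv_lt_trans {p q r : Int × Int} (h1 : pvLt p q) (h2 : pvLt q r) : pvLt p r := by
  unfold pvLt at *; omega

theorem pv_le_trans {p q r : Int × Int} (h1 : pvLe p q) (h2 : pvLe q r) : pvLe p r := by
  rcases h1 with h1 | rfl
  · rcases h2 with h2 | rfl
    · exact Or.inl (pv_lt_trans h1 h2)
    · exact Or.inl h1
  · exact h2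

theorem pv_not_lt {p q : Int × Int} (h : ¬ pvLt p q) : pvLe q p := by
  unfold pvLe pvLt at *
  by_cases he : q = p
  · exact Or.inr he
  · left
    rw [Prod.ext_iff] at he
    omega

-- insertBy keeps a transitive ordering invariant.
theorem pv_insertBy_pw {α : Type} (rel : α → α → Prop) (before : α → α → Bool)
    (htrans : ∀ {a b c}, rel a b → rel b c → rel a c)
    (hT : ∀ a b, before a b = true → rel a b)
    (hF : ∀ a b, before a b = false → rel b a)
    (x : α) (ys : List α) (h : ys.Pairwise rel) :
    (PySem.List.insertBy before x ys).Pairwise rel := by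
  induction ys with
  | nil => simp [PySem.List.insertBy]
  | cons y ys ih =>
      rcases List.pairwise_cons.1 h with ⟨hy, hys⟩
      simp only [PySem.List.insertBy]
      by_cases hb : before x y
      · simp only [hb, if_true]
        refine List.pairwise_cons.2 ⟨?_, h⟩
        intro z hz
        rcases List.mem_cons.1 hz with rfl | hz
        · exact hT _ _ hb
        · exact htrans (hT _ _ hb) (hy z hz)
      · simp only [hb, if_neg, Bool.false_eq_true, not_false_iff]
        refine List.pairwise_cons.2 ⟨?_, ih hys⟩
        intro z hz
        rcases (PySem.List.insertBy_mem_iff before x z ys).1 hz with rfl | hz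
        · exact hF _ _ (by simpa using hb)
        · exact hy z hz

theorem pv_keys_pairwise_le (L : List (Int × Int)) :
    (PySem.List.sorted2 L (fun p => p.1) (fun p => -p.2)).Pairwise pvLe := by
  have main : ∀ (l : List (Int × Int)) (acc : List (Int × Int)), acc.Pairwise pvLe →
      (l.foldl (fun acc x => PySem.List.insertBy pvCmpK x acc) acc).Pairwise pvLe := by
    intro l
    induction l with
    | nil => intro acc h; exact h
    | cons x xs ih =>
        intro acc h
        refine ih _ (pv_insertBy_pw pvLe pvCmpK (fun h1 h2 => pv_le_trans h1 h2) ?_ ?_ x acc h)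
        · intro a b hab; exact Or.inl ((pv_cmpK_true_iff a b).1 hab)
        · intro a b hab; exact pv_not_lt ((pv_cmpK_false_iff a b).1 hab)
  exact main L [] (by simp)

theorem pv_keys_pairwise_lt (L : List (Int × Int)) (h : L.Nodup) :
    (PySem.List.sorted2 L (fun p => p.1) (fun p => -p.2)).Pairwise pvLt := by
  have hnd : (PySem.List.sorted2 L (fun p => p.1) (fun p => -p.2)).Nodup :=
    (PySem.List.sorted2_perm L _ _ false).symm.nodup h
  have hle := pv_keys_pairwise_le L
  have := List.Pairwise.and hle hnd
  exact this.imp (fun hpq => hpq.1.resolve_right hpq.2)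

-- ---- insertBy position facts ----
theorem pv_insertBy_append {α : Type} (b : α → α → Bool) (x : α) (l1 l2 : List α)
    (h : ∀ y ∈ l1, b x y = false) :
    PySem.List.insertBy b x (l1 ++ l2) = l1 ++ PySem.List.insertBy b x l2 := by
  induction l1 with
  | nil => rfl
  | cons y ys ih =>
      simp only [List.cons_append, PySem.List.insertBy, h y (by simp), Bool.false_eq_true, if_neg,
        not_false_iff]
      rw [ih (fun z hz => h z (by simp [hz]))]

theorem pv_insertBy_all_true {α : Type} (b : α → α → Bool) (x : α) (l : List α)
    (h : ∀ y ∈ l, b x y = true) :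
    PySem.List.insertBy b x l = x :: l := by
  cases l with
  | nil => rfl
  | cons y ys => simp [PySem.List.insertBy, h y (by simp)]


theorem pv_lt_irrefl (p : Int × Int) : ¬ pvLt p p := by unfold pvLt; omega

-- Splicing one occurrence into a grouped, strictly key-sorted stream.
theorem pv_insertBy_flatMap (grp : (Int × Int) → List (Int × Int × String)) :
    ∀ (K : List (Int × Int)), K.Pairwise pvLt →
      (∀ k ∈ K, ∀ z ∈ grp k, pvK z = k) → (∀ k ∈ K, grp k ≠ []) →
      ∀ x : Int × Int × String,
      PySem.List.insertBy pvCmpM x (K.flatMap grp) =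
        if pvK x ∈ K then K.flatMap (fun k => if k = pvK x then grp k ++ [x] else grp k)
        else (PySem.List.insertBy pvCmpK (pvK x) K).flatMap (fun k => if k = pvK x then [x] else grp k) := by
  intro K
  induction K with
  | nil => intro _ _ _ x; simp [PySem.List.insertBy]
  | cons k K' ih =>
      intro hpw hκ hne x
      rcases List.pairwise_cons.1 hpw with ⟨hk, hpw'⟩
      by_cases hlt : pvLt (pvK x) k
      · -- x strictly precedes every group
        have hnotmem : pvK x ∉ k :: K' := by
          intro hm
          rcases List.mem_cons.1 hm with rfl | hm
          · exact pv_lt_irrefl _ hlt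
          · exact pv_lt_irrefl _ (pv_lt_trans hlt (hk _ hm))
        rw [if_neg hnotmem]
        have hall : ∀ y ∈ (k :: K').flatMap grp, pvCmpM x y = true := by
          intro y hy
          rcases List.mem_flatMap.1 hy with ⟨k', hk', hy'⟩
          have hky : pvK y = k' := hκ k' hk' y hy'
          have hlt' : pvLt (pvK x) (pvK y) := by
            rw [hky]
            rcases List.mem_cons.1 hk' with rfl | hk''
            · exact hlt
            · exact pv_lt_trans hlt (hk _ hk'')
          rw [pv_cmpM_eq]
          exact (pv_cmpK_true_iff _ _).2 hlt'
        rw [pv_insertBy_all_true _ _ _ hall]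
        have hhead : PySem.List.insertBy pvCmpK (pvK x) (k :: K') = pvK x :: k :: K' := by
          simp [PySem.List.insertBy, (pv_cmpK_true_iff _ _).2 hlt]
        have hcongr : ∀ k' ∈ k :: K', (if k' = pvK x then [x] else grp k') = grp k' := by
          intro k' hk'
          rw [if_neg (fun he => hnotmem (by rw [← he]; exact hk'))]
        have hrhs : List.flatMap (fun k' => if k' = pvK x then [x] else grp k') (pvK x :: k :: K')
            = x :: List.flatMap grp (k :: K') := by
          rw [List.flatMap_cons, List.flatMap_congr hcongr]
          simp
        rw [hhead, hrhs]
      · by_cases heq : pvK x = k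
        · -- x joins the first group, at its end
          rw [if_pos (List.mem_cons.2 (Or.inl heq))]
          have hgrpf : ∀ y ∈ grp k, pvCmpM x y = false := by
            intro y hy
            rw [pv_cmpM_eq, hκ k (by simp) y hy]
            exact (pv_cmpK_false_iff _ _).2 hlt
          have hresttrue : ∀ y ∈ K'.flatMap grp, pvCmpM x y = true := by
            intro y hy
            rcases List.mem_flatMap.1 hy with ⟨k', hk', hy'⟩
            rw [pv_cmpM_eq, hκ k' (by simp [hk']) y hy']
            exact (pv_cmpK_true_iff _ _).2 (heq ▸ hk _ hk')
          rw [List.flatMap_cons, pv_insertBy_append _ _ _ _ hgrpf,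
            pv_insertBy_all_true _ _ _ hresttrue]
          have hK'ne : ∀ k' ∈ K', (if k' = pvK x then grp k' ++ [x] else grp k') = grp k' := by
            intro k' hk'
            rw [if_neg (fun he => pv_lt_irrefl k (by rw [← heq, ← he] at hk ⊢; exact hk _ hk'))]
          rw [List.flatMap_cons, if_pos heq.symm, List.flatMap_congr hK'ne]
          simp
        · -- k strictly precedes x: skip the first group and recurse
          have hklt : pvLt k (pvK x) := (pv_not_lt hlt).resolve_right (fun he => heq he.symm)
          have hgrpf : ∀ y ∈ grp k, pvCmpM x y = false := by
            intro y hy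
            rw [pv_cmpM_eq, hκ k (by simp) y hy]
            exact (pv_cmpK_false_iff _ _).2 hlt
          rw [List.flatMap_cons, pv_insertBy_append _ _ _ _ hgrpf,
            ih hpw' (fun k' hk' => hκ k' (by simp [hk'])) (fun k' hk' => hne k' (by simp [hk'])) x]
          have hmemiff : (pvK x ∈ k :: K') ↔ (pvK x ∈ K') := by
            simp [List.mem_cons, fun h => heq h]
          by_cases hmem : pvK x ∈ K'
          · rw [if_pos hmem, if_pos (hmemiff.2 hmem)]
            rw [List.flatMap_cons, if_neg (fun he => heq he.symm)]
          · rw [if_neg hmem, if_neg (fun h => hmem (hmemiff.1 h))]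
            have hcmpf : pvCmpK (pvK x) k = false := (pv_cmpK_false_iff _ _).2 hlt
            have : PySem.List.insertBy pvCmpK (pvK x) (k :: K')
                = k :: PySem.List.insertBy pvCmpK (pvK x) K' := by
              simp [PySem.List.insertBy, hcmpf]
            rw [this, List.flatMap_cons, if_neg (fun he => heq he.symm)]

-- sorted2 over one appended element is an insertBy (occurrence and key versions).
theorem pv_sorted2_append_occ (M : List (Int × Int × String)) (x : Int × Int × String) :
    PySem.List.sorted2 (M ++ [x]) (fun z => z.1) (fun z => -z.2.1)
      = PySem.List.insertBy pvCmpM x (PySem.List.sorted2 M (fun z => z.1) (fun z => -z.2.1)) := by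
  show (M ++ [x]).foldl (fun acc y => PySem.List.insertBy pvCmpM y acc) [] = _
  rw [List.foldl_append]
  rfl

theorem pv_sorted2_append_key (L : List (Int × Int)) (a : Int × Int) :
    PySem.List.sorted2 (L ++ [a]) (fun p => p.1) (fun p => -p.2)
      = PySem.List.insertBy pvCmpK a (PySem.List.sorted2 L (fun p => p.1) (fun p => -p.2)) := by
  show (L ++ [a]).foldl (fun acc y => PySem.List.insertBy pvCmpK y acc) [] = _
  rw [List.foldl_append]
  rfl

theorem pv_dedup_append {α : Type} [BEq α] [LawfulBEq α] (L : List α) (a : α) :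
    PySem.List.dedup (L ++ [a]) = if a ∈ L then PySem.List.dedup L else PySem.List.dedup L ++ [a] := by
  simp only [PySem.List.dedup_eq_ofList]
  show (L ++ [a]).foldl PySem.Set.add [] = _
  rw [List.foldl_append]
  show PySem.Set.add (PySem.Set.ofList L) a = _
  show (if (PySem.Set.ofList L).contains a then PySem.Set.ofList L else PySem.Set.ofList L ++ [a]) = _
  by_cases hm : a ∈ L
  · rw [if_pos ((PySem.Set.contains_iff _ a).2 ((PySem.Set.mem_ofList L a).2 hm)), if_pos hm]
  · rw [if_neg (fun hc => hm ((PySem.Set.mem_ofList L a).1 ((PySem.Set.contains_iff _ a).1 hc))),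
      if_neg hm]

-- STABILITY: the sorted occurrence stream is the sorted distinct keys with their
-- original-order occurrence groups concatenated.
theorem pv_stab (M : List (Int × Int × String)) :
    PySem.List.sorted2 M (fun z => z.1) (fun z => -z.2.1) =
      (PySem.List.sorted2 (PySem.List.dedup (M.map pvK)) (fun p => p.1) (fun p => -p.2)).flatMap
        (fun k => M.filter (fun z => pvK z == k)) := by
  induction M using List.reverseRecOn with
  | nil => rfl
  | append_singleton M x ih =>
      set K := PySem.List.sorted2 (PySem.List.dedup (M.map pvK)) (fun p => p.1) (fun p => -p.2) with hK
      have hKpw : K.Pairwise pvLt := pv_keys_pairwise_lt _ (PySem.List.nodup_dedup _)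
      have hKmem : ∀ k, k ∈ K ↔ k ∈ M.map pvK := by
        intro k
        rw [(PySem.List.sorted2_perm _ _ _ false).mem_iff, PySem.List.mem_dedup]
      have hκ : ∀ k ∈ K, ∀ z ∈ M.filter (fun z => pvK z == k), pvK z = k := by
        intro k _ z hz
        exact beq_iff_eq.1 (List.mem_filter.1 hz).2
      have hne : ∀ k ∈ K, M.filter (fun z => pvK z == k) ≠ [] := by
        intro k hkK
        rcases List.mem_map.1 ((hKmem k).1 hkK) with ⟨z, hz, hzk⟩
        exact List.ne_nil_of_mem (List.mem_filter.2 ⟨hz, by rw [hzk]; exact beq_iff_eq.2 rfl⟩)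
      rw [pv_sorted2_append_occ, ih, pv_insertBy_flatMap _ K hKpw hκ hne x, List.map_append,
        List.map_cons, List.map_nil, pv_dedup_append]
      by_cases hm : pvK x ∈ M.map pvK
      · rw [if_pos hm, if_pos ((hKmem _).2 hm)]
        apply List.flatMap_congr
        intro k hkK
        rw [List.filter_append]
        by_cases he : k = pvK x
        · rw [if_pos he, List.filter_cons, List.filter_nil]
          rw [show (pvK x == k) = true from beq_iff_eq.2 he.symm]
          simp
        · rw [if_neg he, List.filter_cons, List.filter_nil]
          rw [show (pvK x == k) = false from beq_eq_false_iff_ne.2 (fun h => he h.symm)]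
          simp
      · rw [if_neg hm, if_neg (fun h => hm ((hKmem _).1 h)), pv_sorted2_append_key]
        apply List.flatMap_congr
        intro k hkK
        rcases (PySem.List.mem_insertBy _ _ _ _).1 hkK with rfl | hkK'
        · rw [if_pos rfl, List.filter_append, List.filter_cons]
          have hfilnil : M.filter (fun z => pvK z == pvK x) = [] := by
            rw [List.filter_eq_nil_iff]
            intro z hz
            simp only [beq_iff_eq]
            exact fun he => hm (he ▸ List.mem_map_of_mem hz)
          rw [hfilnil, show (pvK x == pvK x) = true from beq_iff_eq.2 rfl]
          simp
        · have hne' : k ≠ pvK x := fun he => hm ((hKmem _).1 (he ▸ hkK'))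
          rw [if_neg hne', List.filter_append, List.filter_cons,
            show (pvK x == k) = false from beq_eq_false_iff_ne.2 (fun h => hne' h.symm)]
          simp


-- ---- MERGE: per-element counting (A) vs multiplicity-table merging (B) ----
theorem pv_update_add {α : Type} [BEq α] [LawfulBEq α] (s u : PySem.Set α) (x : α) :
    PySem.Set.update s (PySem.Set.add u x) = PySem.Set.add (PySem.Set.update s u) x := by
  by_cases h : u.contains x
  · have hx : x ∈ u := (PySem.Set.contains_iff u x).1 h
    have hx2 : x ∈ PySem.Set.update s u := (PySem.Set.mem_update s u x).2 (Or.inr hx)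
    simp only [PySem.Set.add, h, if_true]
    rw [if_pos ((PySem.Set.contains_iff _ x).2 hx2)]
  · simp only [PySem.Set.add, h, Bool.false_eq_true, if_false]
    show PySem.Set.update s (u ++ [x]) = _
    simp only [PySem.Set.update, List.foldl_append, List.foldl_cons, List.foldl_nil]
    rcases hc : (PySem.Set.update s u).contains x <;> simp [PySem.Set.add]

theorem pv_update_foldl_add {α : Type} [BEq α] [LawfulBEq α] (L : List α) :
    ∀ (u s : PySem.Set α),
      PySem.Set.update s (L.foldl PySem.Set.add u) = PySem.Set.update (PySem.Set.update s u) L := by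
  induction L with
  | nil => intro u s; rfl
  | cons x L ih =>
      intro u s
      show PySem.Set.update s (L.foldl PySem.Set.add (PySem.Set.add u x)) = _
      rw [ih]
      show _ = PySem.Set.update (PySem.Set.add (PySem.Set.update s u) x) L
      rw [pv_update_add]

theorem pv_update_ofList {α : Type} [BEq α] [LawfulBEq α] (s : PySem.Set α) (L : List α) :
    PySem.Set.update s (PySem.Set.ofList L) = PySem.Set.update s L := by
  show PySem.Set.update s (L.foldl PySem.Set.add []) = _
  rw [pv_update_foldl_add]
  rfl

theorem pv_getD_fold_keys (f : String → Int) (ks : List String) :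
    ∀ (d : PySem.Dict String Int) (u : String), ks.Nodup →
    (ks.foldl (fun m k => m.insert k (m.getD k 0 + f k)) d).getD u 0
      = d.getD u 0 + if u ∈ ks then f u else 0 := by
  induction ks with
  | nil => intro d u _; simp
  | cons k ks ih =>
      intro d u hnd
      rcases List.nodup_cons.1 hnd with ⟨hk, hnd'⟩
      simp only [List.foldl_cons]
      rw [ih _ u hnd']
      by_cases he : u = k
      · subst he
        rw [PySem.Dict.getD_insert_self]
        simp [hk]
      · rw [PySem.Dict.getD_insert_of_ne _ _ _ he]
        simp only [List.mem_cons]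
        by_cases hm : u ∈ ks <;> simp [hm, he]

theorem pv_merge (L : List String) (d : PySem.Dict String Int) (hd : d.keys.Nodup) :
    L.foldl (fun m u => m.modify u 0 (· + 1)) d =
      (PySem.Dict.counter L).items.foldl (fun m uc => m.insert uc.1 (m.getD uc.1 0 + uc.2)) d := by
  rw [PySem.Dict.items_counter, List.foldl_map]
  have hkL : (L.foldl (fun m u => m.modify u 0 (· + 1)) d).keys = PySem.Set.update d.keys L :=
    PySem.Dict.keys_foldl_modify L 0 (fun _ _ => (· + 1)) d
  have hkR : ((PySem.Set.ofList L).foldl (fun m k => m.insert k (m.getD k 0 + (L.count k : Int))) d).keys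
      = PySem.Set.update d.keys L := by
    rw [PySem.Dict.keys_foldl_insert (PySem.Set.ofList L) (fun m k => m.getD k 0 + (L.count k : Int)) d]
    exact pv_update_ofList d.keys L
  have hnL : (L.foldl (fun m u => m.modify u 0 (· + 1)) d).keys.Nodup :=
    PySem.Dict.nodup_keys_foldl_modify_key L (fun x => x) 0 (fun _ _ => (· + 1)) d hd
  have hnR : ((PySem.Set.ofList L).foldl (fun m k => m.insert k (m.getD k 0 + (L.count k : Int))) d).keys.Nodup :=
    PySem.Dict.nodup_keys_foldl_insert (PySem.Set.ofList L) (fun m k => m.getD k 0 + (L.count k : Int)) d hd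
  have hval : ∀ u, (L.foldl (fun m u => m.modify u 0 (· + 1)) d).getD u 0
      = ((PySem.Set.ofList L).foldl (fun m k => m.insert k (m.getD k 0 + (L.count k : Int))) d).getD u 0 := by
    intro u
    rw [PySem.Dict.getD_foldl_modify_add_one L d u]
    rw [pv_getD_fold_keys (fun k => (L.count k : Int)) (PySem.Set.ofList L) d u (PySem.Set.nodup_ofList L)]
    by_cases hm : u ∈ L
    · simp [PySem.Set.mem_ofList, hm]
    · simp [PySem.Set.mem_ofList, hm, List.count_eq_zero_of_not_mem hm]
  apply PySem.Dict.ext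
  rw [PySem.Dict.items_eq_map_keys _ hnL 0, PySem.Dict.items_eq_map_keys _ hnR 0, hkL, hkR]
  exact List.map_congr_left (fun k _ => by rw [hval k])

theorem pv_counter_items_nil (L : List String) :
    ((PySem.Dict.counter L).items = [] ↔ L = []) := by
  rw [PySem.Dict.items_counter]
  constructor
  · intro h
    cases L with
    | nil => rfl
    | cons u L =>
        exfalso
        have : u ∈ PySem.Set.ofList (u :: L) := (PySem.Set.mem_ofList _ u).2 (by simp)
        rw [List.map_eq_nil_iff.1 h] at this
        simp at this
  · intro h; subst h; rfl

-- Repeated modifies at the same outer key collapse to one insert.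
theorem pv_collapse {β : Type} (L : List β) (rf : PySem.Dict String Int → β → PySem.Dict String Int) :
    ∀ (D : pvNEs) (t : String),
    L.foldl (fun D u => D.modify t PySem.Dict.empty (fun m => rf m u)) D =
      if L = [] then D else D.insert t (L.foldl rf (D.getD t PySem.Dict.empty)) := by
  induction L with
  | nil => intro D t; simp
  | cons u L ih =>
      intro D t
      simp only [List.foldl_cons]
      rw [show (D.modify t PySem.Dict.empty (fun m => rf m u))
          = D.insert t (rf (D.getD t PySem.Dict.empty) u) from rfl]
      rw [ih]
      by_cases hL : L = []
      · subst hL; simp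
      · simp only [hL, if_neg, reduceCtorEq, not_false_iff]
        rw [PySem.Dict.getD_insert_self, PySem.Dict.insert_insert_self]

-- The per-+1 stream of inner types equals the merged multiplicity table, and keeps pvInv.
theorem pv_merge2 (L : List String) (t : String) (acc : pvNEs × pvTot) (hinv : pvInv acc) :
    (L.foldl (fun acc u =>
        (acc.1.modify t PySem.Dict.empty (fun m => m.modify u 0 (· + 1)),
         acc.2.modify u 0 (· + 1))) acc
      = (PySem.Dict.counter L).items.foldl (fun acc uc =>
        (acc.1.modify t PySem.Dict.empty (fun row => row.insert uc.1 (row.getD uc.1 0 + uc.2)),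
         acc.2.insert uc.1 (acc.2.getD uc.1 0 + uc.2))) acc)
    ∧ pvInv (L.foldl (fun acc u =>
        (acc.1.modify t PySem.Dict.empty (fun m => m.modify u 0 (· + 1)),
         acc.2.modify u 0 (· + 1))) acc) := by
  obtain ⟨acc1, acc2⟩ := acc
  rw [PySem.List.foldl_prod_mk (fun D u => D.modify t PySem.Dict.empty (fun m => m.modify u 0 (· + 1)))
    (fun m u => m.modify u 0 (· + 1)) L acc1 acc2]
  rw [PySem.List.foldl_prod_mk (fun D (uc : String × Int) => D.modify t PySem.Dict.empty (fun row => row.insert uc.1 (row.getD uc.1 0 + uc.2)))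
    (fun m (uc : String × Int) => m.insert uc.1 (m.getD uc.1 0 + uc.2)) (PySem.Dict.counter L).items acc1 acc2]
  rw [pv_collapse L (fun m u => m.modify u 0 (· + 1)) acc1 t,
    pv_collapse (PySem.Dict.counter L).items (fun row uc => row.insert uc.1 (row.getD uc.1 0 + uc.2)) acc1 t]
  have hrow := pv_merge L (acc1.getD t PySem.Dict.empty) (hinv.2.1 t)
  have htot := pv_merge L acc2 hinv.2.2
  constructor
  · by_cases hL : L = []
    · rw [if_pos hL, if_pos ((pv_counter_items_nil L).2 hL), hL]
      rfl
    · rw [if_neg hL, if_neg (fun h => hL ((pv_counter_items_nil L).1 h)), hrow, htot]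
  · by_cases hL : L = []
    · rw [if_pos hL, hL]
      exact ⟨hinv.1, hinv.2.1, hinv.2.2⟩
    · rw [if_neg hL]
      refine ⟨PySem.Dict.nodup_keys_insert _ _ _ hinv.1, ?_, ?_⟩
      · intro k
        rw [PySem.Dict.getD_insert]
        by_cases hk : k = t
        · rw [if_pos hk]
          exact PySem.Dict.nodup_keys_foldl_modify_key L (fun u => u) 0 (fun _ _ => (· + 1)) _ (hinv.2.1 t)
        · rw [if_neg hk]
          exact hinv.2.1 k
      · exact PySem.Dict.nodup_keys_foldl_modify_key L (fun u => u) 0 (fun _ _ => (· + 1)) _ hinv.2.2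


-- ---- A's index loops are the structural recursion ----
theorem pv_loopA_gen (full : List (String × List Int × String)) :
    ∀ (rest : List (String × List Int × String)) (k : Nat) (acc : pvNEs × pvTot),
      full.drop k = rest →
    (PySem.List.pyRange (k : Int) (PySem.List.len full)).foldl (fun acc i =>
      let outer := PySem.List.pyGetD full i ("", ([], ""))
      (PySem.List.pyRange (i + 1) (PySem.List.len full)).foldl (fun acc j =>
        let inner := PySem.List.pyGetD full j ("", ([], ""))
        if PySem.List.pyGetD outer.2.1 0 0 ≤ PySem.List.pyGetD inner.2.1 0 0 ∧
           PySem.List.pyGetD outer.2.1 1 0 ≥ PySem.List.pyGetD inner.2.1 1 0 then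
          (acc.1.modify outer.1 PySem.Dict.empty (fun dd => dd.modify inner.1 0 (· + 1)),
           acc.2.modify inner.1 0 (· + 1))
        else acc) acc) acc = pvRecA rest acc := by
  intro rest
  induction rest with
  | nil =>
      intro k acc hk
      have hlen : full.length ≤ k := by
        have := congrArg List.length hk; simp at this; omega
      rw [PySem.List.len_eq, PySem.List.pyRange_one_eq_nil (by exact_mod_cast hlen)]
      rfl
  | cons x rest ih =>
      intro k acc hk
      have hklt : k < full.length := by
        have := congrArg List.length hk; simp at this; omega
      have hx : PySem.List.pyGetD full (k : Int) ("", ([], "")) = x := by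
        rw [PySem.List.pyGetD_natCast]
        have : full[k]? = some x := by
          have h0 : (full.drop k)[0]? = some x := by rw [hk]; rfl
          rwa [List.getElem?_drop, Nat.add_zero] at h0
        simp [List.getD, this]
      have hdrop : full.drop (k + 1) = rest := by
        have : full.drop (k+1) = (full.drop k).drop 1 := by rw [List.drop_drop]
        rw [this, hk]; rfl
      rw [PySem.List.pyRange_one_cons (by rw [PySem.List.len_eq]; exact_mod_cast hklt)]
      rw [List.foldl_cons]
      simp only [hx]
      rw [show ((k : Int) + 1) = ((k + 1 : Nat) : Int) by push_cast; ring]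
      have hinner := PySem.List.foldl_pyRange_pyGetD full ("", ([], ""))
        (fun (acc : pvNEs × pvTot) (y : String × List Int × String) =>
          if PySem.List.pyGetD x.2.1 0 0 ≤ PySem.List.pyGetD y.2.1 0 0 ∧
             PySem.List.pyGetD x.2.1 1 0 ≥ PySem.List.pyGetD y.2.1 1 0 then
            (acc.1.modify x.1 PySem.Dict.empty (fun dd => dd.modify y.1 0 (· + 1)),
             acc.2.modify y.1 0 (· + 1))
          else acc) acc (a := ((k + 1 : Nat) : Int)) (Int.natCast_nonneg _)
      rw [show ((k + 1 : Nat) : Int).toNat = k + 1 by omega, hdrop] at hinner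
      simp only [] at hinner
      rw [hinner]
      rw [ih (k + 1) _ hdrop]
      simp [pvRecA]

theorem pv_loopA_rec (eps : List (String × List Int × String)) (acc : pvNEs × pvTot) :
    pvLoopA eps acc = pvRecA eps acc := by
  have h := pv_loopA_gen eps eps 0 acc (by simp)
  simp only [Nat.cast_zero] at h
  exact h

-- ---- B's enumerate/slice loops are the structural recursions ----
theorem pv_occ_gen (cross : PySem.Dict String Int) (ts : List String) :
    ∀ (rest : List String) (a : Nat) (acc : pvNEs × pvTot), ts.drop a = rest →
    (PySem.List.enumerate rest (a : Int)).foldl (fun acc at_ =>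
      let acc := (PySem.List.slice ts (some (at_.1 + 1))).foldl (fun acc u =>
        (acc.1.modify at_.2 PySem.Dict.empty (fun row => row.insert u (row.getD u 0 + 1)),
         acc.2.insert u (acc.2.getD u 0 + 1))) acc
      cross.items.foldl (fun acc uc =>
        (acc.1.modify at_.2 PySem.Dict.empty (fun row => row.insert uc.1 (row.getD uc.1 0 + uc.2)),
         acc.2.insert uc.1 (acc.2.getD uc.1 0 + uc.2))) acc) acc = pvOcc cross rest acc := by
  intro rest
  induction rest with
  | nil => intro a acc _; rw [PySem.List.enumerate_nil]; rfl
  | cons t rest ih =>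
      intro a acc ha
      have hdrop : ts.drop (a + 1) = rest := by
        have : ts.drop (a+1) = (ts.drop a).drop 1 := by rw [List.drop_drop]
        rw [this, ha]; rfl
      have hslice : PySem.List.slice ts (some ((a : Int) + 1)) = rest := by
        rw [show ((a : Int) + 1) = ((a + 1 : Nat) : Int) by push_cast; ring]
        rw [PySem.List.slice_from ts (Int.natCast_nonneg _)]
        rw [show ((a + 1 : Nat) : Int).toNat = a + 1 by omega]
        exact hdrop
      rw [PySem.List.enumerate_cons, List.foldl_cons]
      simp only [hslice]
      rw [show ((a : Int) + 1) = ((a + 1 : Nat) : Int) by push_cast; ring]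
      rw [ih (a + 1) _ hdrop]
      simp [pvOcc]

theorem pv_loopB_gen (groups : PySem.Dict (Int × Int) (List String)) (order : List (Int × Int)) :
    ∀ (rest : List (Int × Int)) (g : Nat) (acc : pvNEs × pvTot), order.drop g = rest →
    (PySem.List.enumerate rest (g : Int)).foldl (fun acc gk =>
      let ts := groups.getD gk.2 []
      let cross := (PySem.List.slice order (some (gk.1 + 1))).foldl (fun (cross : PySem.Dict String Int) k2 =>
        if k2.2 ≤ gk.2.2 then
          (groups.getD k2 []).foldl (fun cross u => cross.insert u (cross.getD u 0 + 1)) cross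
        else cross) PySem.Dict.empty
      (PySem.List.enumerate ts).foldl (fun acc at_ =>
        let acc := (PySem.List.slice ts (some (at_.1 + 1))).foldl (fun acc u =>
          (acc.1.modify at_.2 PySem.Dict.empty (fun row => row.insert u (row.getD u 0 + 1)),
           acc.2.insert u (acc.2.getD u 0 + 1))) acc
        cross.items.foldl (fun acc uc =>
          (acc.1.modify at_.2 PySem.Dict.empty (fun row => row.insert uc.1 (row.getD uc.1 0 + uc.2)),
           acc.2.insert uc.1 (acc.2.getD uc.1 0 + uc.2))) acc) acc) acc = pvRecK groups rest acc := by
  intro rest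
  induction rest with
  | nil => intro g acc _; rw [PySem.List.enumerate_nil]; rfl
  | cons k rest ih =>
      intro g acc hg
      have hdrop : order.drop (g + 1) = rest := by
        have : order.drop (g+1) = (order.drop g).drop 1 := by rw [List.drop_drop]
        rw [this, hg]; rfl
      have hslice : PySem.List.slice order (some ((g : Int) + 1)) = rest := by
        rw [show ((g : Int) + 1) = ((g + 1 : Nat) : Int) by push_cast; ring]
        rw [PySem.List.slice_from order (Int.natCast_nonneg _)]
        rw [show ((g + 1 : Nat) : Int).toNat = g + 1 by omega]
        exact hdrop
      rw [PySem.List.enumerate_cons, List.foldl_cons]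
      simp only [hslice]
      have hocc := pv_occ_gen (((rest.foldl (fun (cross : PySem.Dict String Int) k2 =>
        if k2.2 ≤ k.2 then
          (groups.getD k2 []).foldl (fun cross u => cross.insert u (cross.getD u 0 + 1)) cross
        else cross) PySem.Dict.empty))) (groups.getD k []) (groups.getD k []) 0 acc (by simp)
      simp only [Nat.cast_zero] at hocc
      rw [show ((g : Int) + 1) = ((g + 1 : Nat) : Int) by push_cast; ring]
      rw [hocc, ih (g + 1) _ hdrop]
      simp [pvRecK]

theorem pv_loopB_rec (groups : PySem.Dict (Int × Int) (List String)) (order : List (Int × Int))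
    (acc : pvNEs × pvTot) : pvLoopB groups order acc = pvRecK groups order acc := by
  have h := pv_loopB_gen groups order order 0 acc (by simp)
  simp only [Nat.cast_zero] at h
  exact h

-- ---- the grouped recursion computes the pair phase ----
theorem pv_cross_counter (groups : PySem.Dict (Int × Int) (List String)) (rest : List (Int × Int)) (e : Int) :
    rest.foldl (fun (cross : PySem.Dict String Int) k2 =>
      if k2.2 ≤ e then
        (groups.getD k2 []).foldl (fun cross u => cross.insert u (cross.getD u 0 + 1)) cross
      else cross) PySem.Dict.empty
    = PySem.Dict.counter ((rest.filter (fun k2 => decide (k2.2 ≤ e))).flatMap (fun k2 => groups.getD k2 [])) := by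
  rw [PySem.List.foldl_ite_eq_foldl_filter (fun k2 => k2.2 ≤ e)
    (fun (cross : PySem.Dict String Int) k2 =>
      (groups.getD k2 []).foldl (fun cross u => cross.insert u (cross.getD u 0 + 1)) cross) rest PySem.Dict.empty]
  rw [← List.foldl_flatMap]
  rfl

theorem pv_foldl_id {α β : Type} (l : List α) (a : β) : l.foldl (fun acc _ => acc) a = a := by
  simp

theorem pv_occ_step (groups : PySem.Dict (Int × Int) (List String)) (k : Int × Int)
    (K' : List (Int × Int)) (hk : ∀ k' ∈ K', pvLt k k') (t : String) (ts' : List String)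
    (acc : pvNEs × pvTot) (hinv : pvInv acc) :
    (((ts'.map (fun u => (k.1, k.2, u))) ++ K'.flatMap (fun k2 => (groups.getD k2 []).map (fun u => (k2.1, k2.2, u)))).foldl
        (fun acc (y : Int × Int × String) => if k.1 ≤ y.1 ∧ k.2 ≥ y.2.1 then
            (acc.1.modify t PySem.Dict.empty (fun dd => dd.modify y.2.2 0 (· + 1)),
             acc.2.modify y.2.2 0 (· + 1))
          else acc) acc
      = (PySem.Dict.counter ((K'.filter (fun k2 => decide (k2.2 ≤ k.2))).flatMap (fun k2 => groups.getD k2 []))).items.foldl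
          (fun acc uc =>
            (acc.1.modify t PySem.Dict.empty (fun row => row.insert uc.1 (row.getD uc.1 0 + uc.2)),
             acc.2.insert uc.1 (acc.2.getD uc.1 0 + uc.2)))
          (ts'.foldl (fun acc u =>
            (acc.1.modify t PySem.Dict.empty (fun row => row.insert u (row.getD u 0 + 1)),
             acc.2.insert u (acc.2.getD u 0 + 1))) acc))
    ∧ pvInv ((PySem.Dict.counter ((K'.filter (fun k2 => decide (k2.2 ≤ k.2))).flatMap (fun k2 => groups.getD k2 []))).items.foldl
          (fun acc uc =>
            (acc.1.modify t PySem.Dict.empty (fun row => row.insert uc.1 (row.getD uc.1 0 + uc.2)),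
             acc.2.insert uc.1 (acc.2.getD uc.1 0 + uc.2)))
          (ts'.foldl (fun acc u =>
            (acc.1.modify t PySem.Dict.empty (fun row => row.insert u (row.getD u 0 + 1)),
             acc.2.insert u (acc.2.getD u 0 + 1))) acc)) := by
  have hsuf : ((ts'.map (fun u => (k.1, k.2, u)))).foldl
      (fun acc (y : Int × Int × String) => if k.1 ≤ y.1 ∧ k.2 ≥ y.2.1 then
          (acc.1.modify t PySem.Dict.empty (fun dd => dd.modify y.2.2 0 (· + 1)),
           acc.2.modify y.2.2 0 (· + 1))
        else acc) acc
      = ts'.foldl (fun acc u =>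
          (acc.1.modify t PySem.Dict.empty (fun m => m.modify u 0 (· + 1)),
           acc.2.modify u 0 (· + 1))) acc := by
    rw [List.foldl_map]
    apply PySem.List.foldl_congr_mem
    intro a u _
    rw [if_pos ⟨le_refl _, le_refl _⟩]
  set accS := ts'.foldl (fun acc u =>
      (acc.1.modify t PySem.Dict.empty (fun m => m.modify u 0 (· + 1)),
       acc.2.modify u 0 (· + 1))) acc with haccS
  have hinvS : pvInv accS := (pv_merge2 ts' t acc hinv).2
  have hper : ∀ (a : pvNEs × pvTot), ∀ k2 ∈ K',
      ((groups.getD k2 []).map (fun u => (k2.1, k2.2, u))).foldl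
        (fun acc (y : Int × Int × String) => if k.1 ≤ y.1 ∧ k.2 ≥ y.2.1 then
            (acc.1.modify t PySem.Dict.empty (fun dd => dd.modify y.2.2 0 (· + 1)),
             acc.2.modify y.2.2 0 (· + 1))
          else acc) a
      = if k2.2 ≤ k.2 then
          (groups.getD k2 []).foldl (fun acc u =>
            (acc.1.modify t PySem.Dict.empty (fun m => m.modify u 0 (· + 1)),
             acc.2.modify u 0 (· + 1))) a
        else a := by
    intro a k2 hk2
    rw [List.foldl_map]
    have hle1 : k.1 ≤ k2.1 := by
      rcases hk k2 hk2 with h | ⟨h, _⟩ <;> omega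
    by_cases h2 : k2.2 ≤ k.2
    · rw [if_pos h2]
      apply PySem.List.foldl_congr_mem
      intro a' u _
      rw [if_pos ⟨hle1, h2⟩]
    · rw [if_neg h2]
      rw [PySem.List.foldl_congr_mem _ _ (fun a' _ => a') a
        (fun a' u _ => by rw [if_neg (fun hc => h2 hc.2)])]
      exact pv_foldl_id _ a
  constructor
  · rw [List.foldl_append, hsuf, List.foldl_flatMap,
      PySem.List.foldl_congr_mem K' _ _ accS (fun a k2 h => hper a k2 h),
      PySem.List.foldl_ite_eq_foldl_filter (fun k2 => k2.2 ≤ k.2)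
        (fun (a : pvNEs × pvTot) k2 => (groups.getD k2 []).foldl (fun acc u =>
          (acc.1.modify t PySem.Dict.empty (fun m => m.modify u 0 (· + 1)),
           acc.2.modify u 0 (· + 1))) a) K' accS,
      ← List.foldl_flatMap]
    exact (pv_merge2 _ t accS hinvS).1
  · have h := pv_merge2 ((K'.filter (fun k2 => decide (k2.2 ≤ k.2))).flatMap (fun k2 => groups.getD k2 [])) t accS hinvS
    exact h.1 ▸ h.2

theorem pv_group (groups : PySem.Dict (Int × Int) (List String)) (k : Int × Int)
    (K' : List (Int × Int)) (hk : ∀ k' ∈ K', pvLt k k') :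
    ∀ (ts : List String) (acc : pvNEs × pvTot), pvInv acc →
      pvRecC ((ts.map (fun u => (k.1, k.2, u))) ++ K'.flatMap (fun k2 => (groups.getD k2 []).map (fun u => (k2.1, k2.2, u)))) acc
        = pvRecC (K'.flatMap (fun k2 => (groups.getD k2 []).map (fun u => (k2.1, k2.2, u))))
            (pvOcc (PySem.Dict.counter ((K'.filter (fun k2 => decide (k2.2 ≤ k.2))).flatMap (fun k2 => groups.getD k2 []))) ts acc)
      ∧ pvInv (pvOcc (PySem.Dict.counter ((K'.filter (fun k2 => decide (k2.2 ≤ k.2))).flatMap (fun k2 => groups.getD k2 []))) ts acc) := by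
  intro ts
  induction ts with
  | nil => intro acc hinv; exact ⟨rfl, hinv⟩
  | cons t ts' ih =>
      intro acc hinv
      have hstep := pv_occ_step groups k K' hk t ts' acc hinv
      simp only [List.map_cons, List.cons_append, pvRecC, pvOcc]
      rw [hstep.1]
      exact ih _ hstep.2

theorem pv_recC_K (groups : PySem.Dict (Int × Int) (List String)) :
    ∀ (K : List (Int × Int)), K.Pairwise pvLt → ∀ (acc : pvNEs × pvTot), pvInv acc →
      pvRecC (K.flatMap (fun k2 => (groups.getD k2 []).map (fun u => (k2.1, k2.2, u)))) acc
        = pvRecK groups K acc ∧ pvInv (pvRecK groups K acc) := by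
  intro K
  induction K with
  | nil => intro _ acc h; exact ⟨rfl, h⟩
  | cons k K' ih =>
      intro hpw acc hinv
      rcases List.pairwise_cons.1 hpw with ⟨hk, hpw'⟩
      have hg := pv_group groups k K' hk (groups.getD k []) acc hinv
      rw [List.flatMap_cons, hg.1]
      have hrest := ih hpw' _ hg.2
      simp only [pvRecK, pv_cross_counter]
      exact hrest


-- ---- assembling the per-entry step ----
theorem pv_entry (entry : List (String × List (String × List (String × List (List Int)))))
    (acc : pvNEs × pvTot) (hinv : pvInv acc) :
    pvBodyA acc entry = pvBodyB acc entry ∧ pvInv (pvBodyA acc entry) := by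
  have hcollect : pvM entry
      = (((PySem.Dict.mk entry).getD "label" []).foldl (fun eps tp =>
          tp.2.foldl (fun eps ent =>
            ent.2.foldl (fun eps pos => eps ++ [(tp.1, pos, ent.1)]) eps) eps)
          ([] : List (String × List Int × String))).map pvG := pv_collect_eq _
  have hA : pvBodyA acc entry
      = pvRecC (PySem.List.sorted2 (pvM entry) (fun z => z.1) (fun z => -z.2.1)) acc := by
    unfold pvBodyA
    rw [pv_loopA_rec, pv_recA_recC, ← pv_sorted2_map, ← hcollect]
  have hkeys : (pvGroups entry).keys = PySem.List.dedup ((pvM entry).map pvK) := by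
    rw [pv_groups_eq, PySem.Dict.keys_foldl_modify_key (pvM entry) pvK []
      (fun _ z => (· ++ [z.2.2])) PySem.Dict.empty]
    rw [show (PySem.Dict.empty : PySem.Dict (Int × Int) (List String)).keys = [] from rfl,
      PySem.Set.update_nil_left, ← PySem.List.dedup_eq_ofList]
  have hgetD : ∀ k2, (pvGroups entry).getD k2 []
      = ((pvM entry).filter (fun z => pvK z == k2)).map (fun z => z.2.2) := by
    intro k2
    have h := PySem.Dict.getD_foldl_modify_append ((pvM entry).map (fun z => (pvK z, z.2.2)))
      PySem.Dict.empty k2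
    rw [List.foldl_map] at h
    simp only [List.filter_map, List.map_map] at h
    rw [pv_groups_eq]
    exact h
  set K := PySem.List.sorted2 (pvGroups entry).keys (fun p => p.1) (fun p => -p.2) with hKdef
  have hgrp : ∀ k2 ∈ K, (pvM entry).filter (fun z => pvK z == k2)
      = ((pvGroups entry).getD k2 []).map (fun u => (k2.1, k2.2, u)) := by
    intro k2 _
    rw [hgetD k2, List.map_map]
    have hid : ∀ z ∈ (pvM entry).filter (fun z => pvK z == k2),
        ((fun u => (k2.1, k2.2, u)) ∘ fun z => z.2.2) z = id z := by
      intro z hz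
      have hzk := beq_iff_eq.1 (List.mem_filter.1 hz).2
      obtain ⟨a, b, c⟩ := z
      simp only [pvK, Prod.ext_iff] at hzk
      simp [Function.comp, hzk.1.symm, hzk.2.symm]
    rw [List.map_congr_left hid, List.map_id]
  have hKpw : K.Pairwise pvLt := by
    rw [hKdef, hkeys]
    exact pv_keys_pairwise_lt _ (PySem.List.nodup_dedup _)
  have hstab : PySem.List.sorted2 (pvM entry) (fun z => z.1) (fun z => -z.2.1)
      = K.flatMap (fun k2 => ((pvGroups entry).getD k2 []).map (fun u => (k2.1, k2.2, u))) := by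
    rw [pv_stab, ← hkeys, ← hKdef]
    exact List.flatMap_congr hgrp
  have hcore := pv_recC_K (pvGroups entry) K hKpw acc hinv
  have hB : pvBodyB acc entry = pvRecK (pvGroups entry) K acc := pv_loopB_rec _ _ acc
  refine ⟨?_, ?_⟩
  · rw [hA, hstab, hcore.1, hB]
  · rw [hA, hstab, hcore.1]
    exact hcore.2

theorem pv_inv_init : pvInv ((PySem.Dict.empty : pvNEs), (PySem.Dict.empty : pvTot)) :=
  ⟨List.nodup_nil, fun _ => List.nodup_nil, List.nodup_nil⟩

theorem pv_fold (json : List (List (String × List (String × List (String × List (List Int)))))) :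
    ∀ (acc : pvNEs × pvTot), pvInv acc →
      json.foldl pvBodyA acc = json.foldl pvBodyB acc ∧ pvInv (json.foldl pvBodyA acc) := by
  induction json with
  | nil => intro acc h; exact ⟨rfl, h⟩
  | cons e js ih =>
      intro acc h
      have he := pv_entry e acc h
      simp only [List.foldl_cons]
      rw [← he.1]
      exact ih (pvBodyA acc e) he.2

-- ===== VERDICT (by name: the statement is the Claim_ definition above) =====
theorem count_nested_entities_with_totals_spec : Claim_equal_count_nested_entities_with_totals := by
  intro json_data _ _
  unfold Spec_count_nested_entities_with_totals
  exact congrArg (fun r : pvNEs × pvTot => (r.1.items.map (fun p => (p.1, p.2.items)), r.2.items))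
    (pv_fold json_data (PySem.Dict.empty, PySem.Dict.empty) pv_inv_init).1
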